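-- pv_equiv track=rewrite | github.com/StBogdan/PythonWork | Algorithms/Dynamic-Programming/Python_Fibb_mod.py | fibonacci_modified
-- ===== SOURCE A (Python) =====
-- def fibonacci_modified(t1, t2, n):
--     if n == 1:
--         return t1
--     elif n == 2:
--         return t2
--     else:
--         antepen = t1
--         pen = t2
--         for i in range(2, n):
--             newTerm = pen*pen + antepen
--             antepen = pen
--             pen = newTerm
--         return pen
-- ===== SOURCE B (Python) =====
-- def fibonacci_modified(t1, t2, n):
--     if n == 1:
--         return t1
--     if n <= 2:
--         return t2
--     return fibonacci_modified(t1, t2, n - 1) ** 2 + fibonacci_modified(t1, t2, n - 2)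
-- ===== Notes on version B (the rewrite author's own statement) =====
-- stated objective: alternative
-- what changed: Replaced the bottom-up loop carrying (antepen, pen) state by a direct naive recursion on n implementing term(n) = term(n-1)**2 + term(n-2) with base cases t1 for n==1 and t2 for n<=2.
import Mathlib
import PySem

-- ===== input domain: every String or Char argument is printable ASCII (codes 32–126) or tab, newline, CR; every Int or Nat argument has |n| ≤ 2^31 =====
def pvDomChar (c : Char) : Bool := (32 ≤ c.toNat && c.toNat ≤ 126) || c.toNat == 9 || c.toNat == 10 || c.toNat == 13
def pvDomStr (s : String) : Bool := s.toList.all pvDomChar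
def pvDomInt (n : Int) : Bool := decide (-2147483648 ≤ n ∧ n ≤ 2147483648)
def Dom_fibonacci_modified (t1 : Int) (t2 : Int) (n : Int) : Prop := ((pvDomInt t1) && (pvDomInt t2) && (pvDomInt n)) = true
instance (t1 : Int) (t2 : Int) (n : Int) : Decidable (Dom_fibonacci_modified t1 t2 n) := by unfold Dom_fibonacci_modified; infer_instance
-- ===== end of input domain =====

-- B replaces A's bottom-up loop by a direct naive recursion on n (term n = term (n-1)^2 + term (n-2)); alternative decomposition, not faster.


-- ===== PORT A =====
def fibonacci_modified (t1 : Int) (t2 : Int) (n : Int) : Int :=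
  if n = 1 then t1
  else if n = 2 then t2
  else
    -- antepen = t1; pen = t2; for i in range(2, n): …
    let s := (PySem.List.pyRange 2 n 1).foldl
      (fun (st : Int × Int) _ =>
        let newTerm := st.2 * st.2 + st.1
        (st.2, newTerm)) (t1, t2)
    s.2

-- ===== PORT B =====
def fibonacci_modified_alt (t1 : Int) (t2 : Int) (n : Int) : Int :=
  if n = 1 then t1
  else if n ≤ 2 then t2
  else fibonacci_modified_alt t1 t2 (n - 1) ^ 2 + fibonacci_modified_alt t1 t2 (n - 2)
termination_by n.toNat
decreasing_by all_goals omega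

-- ===== PRECONDITION & SPEC =====
def Spec_fibonacci_modified (t1 : Int) (t2 : Int) (n : Int) (out : Int) : Prop := out = fibonacci_modified_alt t1 t2 n
instance (t1 : Int) (t2 : Int) (n : Int) (out : Int) : Decidable (Spec_fibonacci_modified t1 t2 n out) := by unfold Spec_fibonacci_modified; infer_instance

-- ===== CLAIM (what is proved, stated in full; the proofs are below) =====
def Claim_equal_fibonacci_modified : Prop := ∀ (t1 : Int) (t2 : Int) (n : Int), Dom_fibonacci_modified t1 t2 n → Spec_fibonacci_modified t1 t2 n (fibonacci_modified t1 t2 n)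

-- ===== LEMMAS AND PROOFS =====

/-- One step of A's loop. -/
def fmStep (st : Int × Int) : Int × Int := (st.2, st.2 * st.2 + st.1)

/-- A fold over a list with a body that ignores the elements is an iterate of the step. -/
lemma foldl_const_step (l : List Int) (st : Int × Int) :
    l.foldl (fun (st : Int × Int) _ => fmStep st) st = fmStep^[l.length] st := by
  induction l generalizing st with
  | nil => rfl
  | cons a l ih => simp [List.foldl, ih, Function.iterate_succ_apply]

@[simp] lemma alt_one (t1 t2 : Int) : fibonacci_modified_alt t1 t2 1 = t1 := by
  rw [fibonacci_modified_alt]; simp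

@[simp] lemma alt_two (t1 t2 : Int) : fibonacci_modified_alt t1 t2 2 = t2 := by
  rw [fibonacci_modified_alt]; norm_num

lemma alt_rec (t1 t2 n : Int) (h : 2 < n) :
    fibonacci_modified_alt t1 t2 n
      = fibonacci_modified_alt t1 t2 (n - 1) ^ 2 + fibonacci_modified_alt t1 t2 (n - 2) := by
  rw [fibonacci_modified_alt]
  have h1 : ¬ n = 1 := by omega
  have h2 : ¬ n ≤ 2 := by omega
  simp [h1, h2]

/-- The iterate of A's step is the pair of consecutive B-values. -/
lemma iterate_eq_alt (t1 t2 : Int) (k : Nat) :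
    fmStep^[k] (t1, t2)
      = (fibonacci_modified_alt t1 t2 ((k : Int) + 1),
         fibonacci_modified_alt t1 t2 ((k : Int) + 2)) := by
  induction k with
  | zero => simp
  | succ k ih =>
    rw [Function.iterate_succ_apply', ih]
    have h3 : (2 : Int) < (k : Int) + 3 := by omega
    have e1 : ((k : Int) + 3) - 1 = (k : Int) + 2 := by ring
    have e2 : ((k : Int) + 3) - 2 = (k : Int) + 1 := by ring
    have := alt_rec t1 t2 ((k : Int) + 3) h3
    rw [e1, e2] at this
    simp only [fmStep]
    push_cast
    rw [show (k : Int) + 1 + 1 = (k : Int) + 2 by ring,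
        show (k : Int) + 1 + 2 = (k : Int) + 3 by ring, this]
    exact Prod.ext rfl (by ring)

theorem fibonacci_modified_eq_alt (t1 t2 n : Int) :
    fibonacci_modified t1 t2 n = fibonacci_modified_alt t1 t2 n := by
  unfold fibonacci_modified
  by_cases h1 : n = 1
  · simp [h1]
  by_cases h2 : n = 2
  · simp [h2]
  simp only [h1, h2, if_false]
  by_cases h3 : n ≤ 2
  · -- empty loop: A returns t2, and B returns t2 since n ≤ 2, n ≠ 1
    rw [PySem.List.pyRange_one_eq_nil (by omega)]
    rw [fibonacci_modified_alt]
    simp [h1, h3]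
  · have hlen : (PySem.List.pyRange 2 n 1).length = (n - 2).toNat :=
      PySem.List.length_pyRange_one 2 n
    have : (PySem.List.pyRange 2 n 1).foldl
        (fun (st : Int × Int) _ =>
          let newTerm := st.2 * st.2 + st.1
          (st.2, newTerm)) (t1, t2)
        = fmStep^[(n - 2).toNat] (t1, t2) := by
      rw [← hlen, ← foldl_const_step]
      rfl
    rw [this, iterate_eq_alt]
    have : ((n - 2).toNat : Int) + 2 = n := by omega
    rw [this]

-- ===== VERDICT (by name: the statement is the Claim_ definition above) =====
theorem fibonacci_modified_spec : Claim_equal_fibonacci_modified := by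
  intro t1 t2 n _
  exact fibonacci_modified_eq_alt t1 t2 n
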